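-- pv_equiv track=rewrite | github.com/CipherShi/codilityTests | countNonDivisible.py | solution
-- ===== SOURCE A (Python) =====
-- def solution(A):
--
--     A_max = max(A)
--
--     count = {}
--     for element in A:
--         if element not in count:
--             count[element] = 1
--         else:
--             count[element] += 1
--
--     divisors = {}
--     for element in A:
--         divisors[element] = set([1, element])
--
--     # start the Sieve of Eratosthenes
--     divisor = 2
--     while divisor*divisor <= A_max:
--         element_candidate = divisor
--         while element_candidate  <= A_max:
--             if element_candidate in divisors and not divisor in divisors[element_candidate]:
--                 divisors[element_candidate].add(divisor)
--                 divisors[element_candidate].add(element_candidate//divisor)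
--             element_candidate += divisor
--         divisor += 1
--
--     result = [0] * len(A)
--     for idx, element in enumerate(A):
--         result[idx] = (len(A)-sum([count.get(divisor,0) for divisor in divisors[element]]))
--
--     return result
-- ===== SOURCE B (Python) =====
-- def solution(A):
--     n = len(A)
--     count = {}
--     for x in A:
--         count[x] = count.get(x, 0) + 1
--     res = []
--     for e in A:
--         divs = {1, e}
--         d = 2
--         while d * d <= e:
--             if e % d == 0:
--                 divs.add(d)
--                 divs.add(e // d)
--             d += 1
--         res.append(n - sum(count.get(d, 0) for d in divs))
--     return res
-- ===== Notes on version B (the rewrite author's own statement) =====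
-- stated objective: simpler
-- what changed: Replaces A's global sieve (a dict mapping every element to a growing set of divisors, filled by stepping through all multiples of every divisor up to sqrt(max(A))) by a per-element divisor set built with trial division up to sqrt(element); Pre_ excludes only the empty list, on which A's max(A) raises ValueError.
import Mathlib
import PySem

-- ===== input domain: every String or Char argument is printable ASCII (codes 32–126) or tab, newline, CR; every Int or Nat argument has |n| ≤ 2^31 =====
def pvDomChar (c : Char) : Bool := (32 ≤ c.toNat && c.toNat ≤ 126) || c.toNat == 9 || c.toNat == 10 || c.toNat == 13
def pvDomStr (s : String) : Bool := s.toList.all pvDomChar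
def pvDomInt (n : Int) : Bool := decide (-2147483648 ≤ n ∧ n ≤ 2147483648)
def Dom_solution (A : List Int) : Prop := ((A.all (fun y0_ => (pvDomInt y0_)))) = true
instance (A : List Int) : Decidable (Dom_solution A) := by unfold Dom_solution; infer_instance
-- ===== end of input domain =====

-- B replaces A's divisor-set sieve by a per-element divisor set built with trial
-- division up to sqrt(element) (simpler; return value proved equal on nonempty
-- lists, where A does not raise).


-- ===== PORT A =====
-- the 'count' accumulation loop of A
def countA (A : List Int) : PySem.Dict Int Int :=
  A.foldl
    (fun c e => match c.get? e with
      | none => c.insert e 1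
      | some v => c.insert e (v + 1)) PySem.Dict.empty

-- the 'divisors[element] = set([1, element])' loop of A
def divisors0 (A : List Int) : PySem.Dict Int (PySem.Set Int) :=
  A.foldl (fun d e => d.insert e (PySem.Set.ofList [1, e])) PySem.Dict.empty

-- inner 'while element_candidate <= A_max' loop of A's sieve (the 0 < d guard only makes the recursion total; every call has d ≥ 2)
def sieveInner (A_max d : Int) (ec : Int) (divisors : PySem.Dict Int (PySem.Set Int)) :
    PySem.Dict Int (PySem.Set Int) :=
  if _h : 0 < d ∧ ec ≤ A_max then
    let divisors' :=
      match divisors.get? ec with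
      | none => divisors
      | some s =>
        if PySem.Set.contains s d then divisors
        else divisors.insert ec (PySem.Set.add (PySem.Set.add s d) (PySem.Int.floordiv ec d))
    sieveInner A_max d (ec + d) divisors'
  else divisors
termination_by (A_max + 1 - ec).toNat
decreasing_by omega

-- outer 'while divisor*divisor <= A_max' loop (the 2 ≤ d guard only makes the recursion total; d starts at 2 and increases)
def sieveOuter (A_max d : Int) (divisors : PySem.Dict Int (PySem.Set Int)) :
    PySem.Dict Int (PySem.Set Int) :=
  if h : 2 ≤ d ∧ d * d ≤ A_max then
    sieveOuter A_max (d + 1) (sieveInner A_max d d divisors)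
  else divisors
termination_by (A_max + 1 - d).toNat
decreasing_by
  have hd : d ≤ d * d := by nlinarith [h.1]
  omega

def solution (A : List Int) : List Int :=
  match PySem.List.max? A (fun x => x) with
  | none => []  -- unreachable under Pre_solution: Python's max(A) raises ValueError on []
  | some A_max =>
    let divisors := sieveOuter A_max 2 (divisors0 A)
    A.map (fun e =>
      (A.length : Int) -
        ((divisors.getD e PySem.Set.empty).map (fun dv => (countA A).getD dv 0)).sum)

-- ===== PORT B =====
-- the count-dict loop of B
def countB (A : List Int) : PySem.Dict Int Int :=
  A.foldl (fun c x => c.insert x (c.getD x 0 + 1)) PySem.Dict.empty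

-- B's 'while d*d <= e' trial-division loop growing the divisor set (the 2 ≤ d
-- guard only makes the recursion total; d starts at 2 and increases)
def divsLoop (e d : Int) (s : PySem.Set Int) : PySem.Set Int :=
  if h : 2 ≤ d ∧ d * d ≤ e then
    let s' :=
      if PySem.Int.mod e d = 0 then
        PySem.Set.add (PySem.Set.add s d) (PySem.Int.floordiv e d)
      else s
    divsLoop e (d + 1) s'
  else s
termination_by (e + 1 - d).toNat
decreasing_by
  have : d ≤ d * d := by nlinarith [h.1]
  omega

def solution_alt (A : List Int) : List Int :=
  A.map (fun e =>
    (A.length : Int) -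
      ((divsLoop e 2 (PySem.Set.ofList [1, e])).map (fun d => (countB A).getD d 0)).sum)

-- ===== PRECONDITION & SPEC =====
-- Pre_ excludes exactly the empty list, on which A's max(A) raises ValueError.
def Pre_solution (A : List Int) : Prop := A ≠ []
instance (A : List Int) : Decidable (Pre_solution A) := by unfold Pre_solution; infer_instance
def pvWitness_solution : List Int := [3, 1, 2, 3, 6]

def Spec_solution (A : List Int) (out : List Int) : Prop := out = solution_alt A
instance (A : List Int) (out : List Int) : Decidable (Spec_solution A out) := by unfold Spec_solution; infer_instance

-- ===== CLAIM (what is proved, stated in full; the proofs are below) =====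
def Claim_equal_solution : Prop := ∀ (A : List Int), Dom_solution A → Pre_solution A → Spec_solution A (solution A)

-- ===== LEMMAS AND PROOFS =====

-- membership in divisors[e] after A's sieve has processed divisors 2 .. d0-1
def Msie (d0 e x : Int) : Prop :=
  x = 1 ∨ x = e ∨ ∃ k, 2 ≤ k ∧ k < d0 ∧ k ∣ e ∧ k ≤ e ∧ (x = k ∨ x = PySem.Int.floordiv e k)

-- membership in divisors[e] after A's sieve has finished
def Mfin (A_max e x : Int) : Prop :=
  x = 1 ∨ x = e ∨ ∃ k, 2 ≤ k ∧ k * k ≤ A_max ∧ k ∣ e ∧ k ≤ e ∧ (x = k ∨ x = PySem.Int.floordiv e k)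

-- loop invariant of A's sieve
def InvD (d0 : Int) (A : List Int) (D : PySem.Dict Int (PySem.Set Int)) : Prop :=
  ∀ e ∈ A, ∃ s, D.get? e = some s ∧ s.Nodup ∧ ∀ x, x ∈ s ↔ Msie d0 e x

lemma countA_eq_countB (A : List Int) : countA A = countB A := by
  unfold countA countB
  have hstep : (fun (c : PySem.Dict Int Int) (e : Int) => match c.get? e with
      | none => c.insert e 1
      | some v => c.insert e (v + 1)) =
      (fun (c : PySem.Dict Int Int) (x : Int) => c.insert x (c.getD x 0 + 1)) := by
    funext c e
    cases hc : c.get? e <;>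
      simp [PySem.Dict.getD_eq_get?_getD, hc]
  rw [hstep]

lemma divisors0_aux (A : List Int) (d : PySem.Dict Int (PySem.Set Int)) (e : Int) :
    (A.foldl (fun d e => d.insert e (PySem.Set.ofList [1, e])) d).get? e =
      if e ∈ A then some (PySem.Set.ofList [1, e]) else d.get? e := by
  induction A generalizing d with
  | nil => simp
  | cons x xs ih =>
    simp only [List.foldl_cons, ih, List.mem_cons]
    by_cases hxs : e ∈ xs
    · simp [hxs]
    · by_cases hex : e = x
      · subst hex
        simp [hxs, PySem.Dict.get?_insert_self]
      · simp [hxs, hex, PySem.Dict.get?_insert_of_ne _ _ hex]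

lemma sieveInner_get?_aux (A_max d : Int) (hd : 0 < d) :
    ∀ (n : Nat) (ec : Int) (D : PySem.Dict Int (PySem.Set Int)) (e : Int),
      (A_max + 1 - ec).toNat ≤ n →
      (sieveInner A_max d ec D).get? e =
        if ec ≤ e ∧ e ≤ A_max ∧ d ∣ (e - ec) then
          (D.get? e).map (fun s =>
            if PySem.Set.contains s d then s
            else PySem.Set.add (PySem.Set.add s d) (PySem.Int.floordiv e d))
        else D.get? e := by
  intro n
  induction n with
  | zero =>
    intro ec D e hn
    rw [sieveInner, dif_neg (by omega), if_neg (by rintro ⟨h1, h2, -⟩; omega)]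
  | succ n ih =>
    intro ec D e hn
    by_cases hec : ec ≤ A_max
    · rw [sieveInner, dif_pos ⟨hd, hec⟩]
      dsimp only
      have hfuel : (A_max + 1 - (ec + d)).toNat ≤ n := by omega
      by_cases hee : e = ec
      · subst hee
        rw [ih _ _ e hfuel, if_neg (by rintro ⟨h1, -, -⟩; omega),
          if_pos ⟨le_refl e, hec, by simp⟩]
        cases hD : D.get? e with
        | none => simp [hD]
        | some s =>
          dsimp only
          by_cases hc : d ∈ s
          · simp [hc, hD]
          · simp [hc, PySem.Dict.get?_insert_self]
      · rw [ih _ _ e hfuel]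
        have hget : (match D.get? ec with
            | none => D
            | some s =>
              if PySem.Set.contains s d then D
              else D.insert ec (PySem.Set.add (PySem.Set.add s d) (PySem.Int.floordiv ec d))).get? e
            = D.get? e := by
          cases hD : D.get? ec with
          | none => rfl
          | some s =>
            dsimp only
            by_cases hc : d ∈ s
            · simp [hc]
            · simp [hc, PySem.Dict.get?_insert_of_ne _ _ hee]
        rw [hget]
        have hdvd_iff : d ∣ (e - (ec + d)) ↔ d ∣ (e - ec) := by
          constructor
          · intro h
            exact (show e - ec = (e - (ec + d)) + d by ring) ▸ dvd_add h (dvd_refl d)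
          · intro h
            exact (show e - (ec + d) = (e - ec) - d by ring) ▸ dvd_sub h (dvd_refl d)
        by_cases hC : ec ≤ e ∧ e ≤ A_max ∧ d ∣ (e - ec)
        · have hle : ec + d ≤ e := by
            obtain ⟨h1, -, hdv⟩ := hC
            have hpos : 0 < e - ec := by omega
            have := Int.le_of_dvd hpos hdv
            omega
          rw [if_pos ⟨hle, hC.2.1, hdvd_iff.mpr hC.2.2⟩, if_pos hC]
        · rw [if_neg (by rintro ⟨h1, h2, hdv⟩; exact hC ⟨by omega, h2, hdvd_iff.mp hdv⟩),
            if_neg hC]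
    · rw [sieveInner, dif_neg (by omega), if_neg (by rintro ⟨h1, h2, -⟩; omega)]

lemma sieveInner_get? (A_max d ec : Int) (D : PySem.Dict Int (PySem.Set Int)) (hd : 0 < d)
    (e : Int) :
    (sieveInner A_max d ec D).get? e =
      if ec ≤ e ∧ e ≤ A_max ∧ d ∣ (e - ec) then
        (D.get? e).map (fun s =>
          if PySem.Set.contains s d then s
          else PySem.Set.add (PySem.Set.add s d) (PySem.Int.floordiv e d))
      else D.get? e :=
  sieveInner_get?_aux A_max d hd _ ec D e le_rfl

lemma Msie_succ (d e x : Int) :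
    Msie (d + 1) e x ↔ Msie d e x ∨ (2 ≤ d ∧ d ∣ e ∧ d ≤ e ∧ (x = d ∨ x = PySem.Int.floordiv e d)) := by
  unfold Msie
  constructor
  · rintro (h | h | ⟨k, hk2, hkd, hdvd, hke, hx⟩)
    · exact Or.inl (Or.inl h)
    · exact Or.inl (Or.inr (Or.inl h))
    · by_cases hkd' : k = d
      · subst hkd'; exact Or.inr ⟨hk2, hdvd, hke, hx⟩
      · exact Or.inl (Or.inr (Or.inr ⟨k, hk2, by omega, hdvd, hke, hx⟩))
  · rintro ((h | h | ⟨k, hk2, hkd, hdvd, hke, hx⟩) | ⟨hd2, hdvd, hde, hx⟩)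
    · exact Or.inl h
    · exact Or.inr (Or.inl h)
    · exact Or.inr (Or.inr ⟨k, hk2, by omega, hdvd, hke, hx⟩)
    · exact Or.inr (Or.inr ⟨d, hd2, by omega, hdvd, hde, hx⟩)

lemma fdiv_fdiv (e k : Int) (he : 0 < e) (hk2 : 2 ≤ k) (hdvd : k ∣ e) :
    PySem.Int.floordiv e (PySem.Int.floordiv e k) = k := by
  obtain ⟨m, hm⟩ := hdvd
  have hk0 : 0 < k := by omega
  have hm0 : 0 < m := by nlinarith
  rw [PySem.Int.floordiv_eq_ediv_of_pos hk0, hm, Int.mul_ediv_cancel_left _ (by omega)]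
  rw [PySem.Int.floordiv_eq_ediv_of_pos hm0, mul_comm, Int.mul_ediv_cancel_left _ (by omega)]

lemma inv_step (A_max d : Int) (A : List Int) (D : PySem.Dict Int (PySem.Set Int))
    (h2 : 2 ≤ d) (hmax : ∀ e ∈ A, e ≤ A_max) (hI : InvD d A D) :
    InvD (d + 1) A (sieveInner A_max d d D) := by
  intro e he
  obtain ⟨s, hs, hnd, hmem⟩ := hI e he
  have hd0 : (0 : Int) < d := by omega
  have hdvd_iff : d ∣ (e - d) ↔ d ∣ e := by
    constructor
    · intro h; exact (show e = (e - d) + d by ring) ▸ dvd_add h (dvd_refl d)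
    · intro h; exact dvd_sub h (dvd_refl d)
  by_cases hC : d ≤ e ∧ d ∣ e
  · have hcond : d ≤ e ∧ e ≤ A_max ∧ d ∣ (e - d) := ⟨hC.1, hmax e he, hdvd_iff.mpr hC.2⟩
    rw [sieveInner_get? A_max d d D hd0 e, if_pos hcond, hs]
    have he2 : 2 ≤ e := by omega
    by_cases hin : d ∈ s
    · refine ⟨s, by simp [hin], hnd, fun x => ?_⟩
      have hfd : PySem.Int.floordiv e d ∈ s := by
        have hMd : Msie d e d := (hmem d).mp hin
        rcases hMd with h1 | hde | ⟨k, hk2, hkd, hkdvd, hke, (hdk | hdk)⟩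
        · omega
        · rw [hde]
          have h1 : PySem.Int.floordiv e e = 1 := by
            rw [PySem.Int.floordiv_eq_ediv_of_pos (by omega), Int.ediv_self (by omega)]
          rw [h1]
          exact (hmem 1).mpr (Or.inl rfl)
        · omega
        · rw [hdk, fdiv_fdiv e k (by omega) hk2 hkdvd]
          exact (hmem k).mpr (Or.inr (Or.inr ⟨k, hk2, hkd, hkdvd, hke, Or.inl rfl⟩))
      rw [hmem x, Msie_succ]
      constructor
      · exact Or.inl
      · rintro (h | ⟨-, -, -, (hxd | hxd)⟩)
        · exact h
        · rw [hxd]; exact (hmem d).mp hin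
        · rw [hxd]; exact (hmem _).mp hfd
    · refine ⟨PySem.Set.add (PySem.Set.add s d) (PySem.Int.floordiv e d), by simp [hin], ?_, fun x => ?_⟩
      · exact PySem.Set.nodup_add _ _ (PySem.Set.nodup_add _ _ hnd)
      · rw [PySem.Set.mem_add, PySem.Set.mem_add, hmem x, Msie_succ]
        constructor
        · rintro ((h | rfl) | rfl)
          · exact Or.inl h
          · exact Or.inr ⟨h2, hC.2, hC.1, Or.inl rfl⟩
          · exact Or.inr ⟨h2, hC.2, hC.1, Or.inr rfl⟩
        · rintro (h | ⟨-, -, -, (rfl | rfl)⟩)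
          · exact Or.inl (Or.inl h)
          · exact Or.inl (Or.inr rfl)
          · exact Or.inr rfl
  · rw [sieveInner_get? A_max d d D hd0 e,
      if_neg (by rintro ⟨h1, -, hdv⟩; exact hC ⟨h1, hdvd_iff.mp hdv⟩)]
    refine ⟨s, hs, hnd, fun x => ?_⟩
    rw [hmem x, Msie_succ]
    constructor
    · exact Or.inl
    · rintro (h | ⟨-, hdvd', hde', -⟩)
      · exact h
      · exact absurd ⟨hde', hdvd'⟩ hC

lemma Msie_final (A_max d e x : Int) (h2 : 2 ≤ d) (hdd : A_max < d * d)
    (hprev : ∀ k, 2 ≤ k → k < d → k * k ≤ A_max) :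
    Msie d e x ↔ Mfin A_max e x := by
  unfold Msie Mfin
  constructor
  · rintro (h | h | ⟨k, hk2, hkd, hkdvd, hke, hx⟩)
    · exact Or.inl h
    · exact Or.inr (Or.inl h)
    · exact Or.inr (Or.inr ⟨k, hk2, hprev k hk2 hkd, hkdvd, hke, hx⟩)
  · rintro (h | h | ⟨k, hk2, hkk, hkdvd, hke, hx⟩)
    · exact Or.inl h
    · exact Or.inr (Or.inl h)
    · refine Or.inr (Or.inr ⟨k, hk2, ?_, hkdvd, hke, hx⟩)
      by_contra hkd
      have hdk : d ≤ k := by omega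
      nlinarith

lemma sieveOuter_inv (A_max : Int) (A : List Int) (hmax : ∀ e ∈ A, e ≤ A_max) :
    ∀ (n : Nat) (d : Int) (D : PySem.Dict Int (PySem.Set Int)),
      (A_max + 1 - d).toNat ≤ n → 2 ≤ d → (∀ k, 2 ≤ k → k < d → k * k ≤ A_max) →
      InvD d A D →
      ∀ e ∈ A, ∃ s, (sieveOuter A_max d D).get? e = some s ∧ s.Nodup ∧
        ∀ x, x ∈ s ↔ Mfin A_max e x := by
  intro n
  induction n with
  | zero =>
    intro d D hn h2 hprev hI
    have hdle : A_max < d := by omega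
    have hdd : A_max < d * d := by nlinarith
    rw [sieveOuter, dif_neg (by rintro ⟨-, h⟩; omega)]
    intro e he
    obtain ⟨s, hs, hnd, hmem⟩ := hI e he
    exact ⟨s, hs, hnd, fun x => (hmem x).trans (Msie_final A_max d e x h2 hdd hprev)⟩
  | succ n ih =>
    intro d D hn h2 hprev hI
    by_cases hdd : d * d ≤ A_max
    · rw [sieveOuter, dif_pos ⟨h2, hdd⟩]
      have hdle : d ≤ A_max := le_trans (by nlinarith) hdd
      refine ih (d + 1) _ (by omega) (by omega) ?_ (inv_step A_max d A D h2 hmax hI)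
      intro k hk2 hkd
      by_cases hkd' : k = d
      · subst hkd'; exact hdd
      · exact hprev k hk2 (by omega)
    · rw [sieveOuter, dif_neg (by rintro ⟨-, h⟩; exact hdd h)]
      intro e he
      obtain ⟨s, hs, hnd, hmem⟩ := hI e he
      exact ⟨s, hs, hnd, fun x =>
        (hmem x).trans (Msie_final A_max d e x h2 (by omega) hprev)⟩

lemma Mfin_pos (A_max e x : Int) (he : 1 ≤ e) (hle : e ≤ A_max) :
    Mfin A_max e x ↔ 1 ≤ x ∧ x ∣ e := by
  unfold Mfin
  constructor
  · rintro (rfl | rfl | ⟨k, hk2, hkk, hdvd, hke, (rfl | rfl)⟩)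
    · exact ⟨le_refl _, one_dvd _⟩
    · exact ⟨he, dvd_refl _⟩
    · exact ⟨by omega, hdvd⟩
    · have hk0 : 0 < k := by omega
      obtain ⟨m, hm⟩ := hdvd
      have hm0 : 0 < m := by nlinarith
      rw [PySem.Int.floordiv_eq_ediv_of_pos hk0, hm, Int.mul_ediv_cancel_left _ (by omega)]
      exact ⟨hm0, ⟨k, by ring⟩⟩
  · rintro ⟨hx1, hdvd⟩
    have hxe : x ≤ e := Int.le_of_dvd (by omega) hdvd
    by_cases hx1' : x = 1
    · exact Or.inl hx1'
    · by_cases hxe' : x = e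
      · exact Or.inr (Or.inl hxe')
      · have hx2 : 2 ≤ x := by omega
        obtain ⟨q, hq⟩ := hdvd
        have hq0 : 0 < q := by nlinarith
        have hq1 : q ≠ 1 := by intro h; rw [h] at hq; omega
        have hq2 : 2 ≤ q := by omega
        have hqe : q ≤ e := Int.le_of_dvd (by omega) ⟨x, by rw [hq]; ring⟩
        by_cases hxx : x * x ≤ A_max
        · exact Or.inr (Or.inr ⟨x, hx2, hxx, ⟨q, hq⟩, hxe, Or.inl rfl⟩)
        · have hqx : q < x := by nlinarith
          have hqq : q * q ≤ A_max := by nlinarith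
          refine Or.inr (Or.inr ⟨q, hq2, hqq, ⟨x, by rw [hq]; ring⟩, hqe, Or.inr ?_⟩)
          rw [PySem.Int.floordiv_eq_ediv_of_pos hq0, hq, mul_comm, Int.mul_ediv_cancel_left _ (by omega)]

lemma Mfin_nonpos (A_max e x : Int) (he : e ≤ 0) : Mfin A_max e x ↔ x = 1 ∨ x = e := by
  unfold Mfin
  constructor
  · rintro (h | h | ⟨k, hk2, _, _, hke, _⟩)
    · exact Or.inl h
    · exact Or.inr h
    · omega
  · rintro (h | h)
    · exact Or.inl h
    · exact Or.inr (Or.inl h)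

-- membership after B's trial-division loop has processed candidates 2 .. d-1 is
-- the old membership plus the divisor pairs found from d upwards
lemma divsLoop_mem_aux (e : Int) :
    ∀ (n : Nat) (d : Int) (s : PySem.Set Int) (x : Int), 2 ≤ d → (e + 1 - d).toNat ≤ n →
      (x ∈ divsLoop e d s ↔
        x ∈ s ∨ ∃ k, d ≤ k ∧ k * k ≤ e ∧ k ∣ e ∧ (x = k ∨ x = PySem.Int.floordiv e k)) := by
  intro n
  induction n with
  | zero =>
    intro d s x h2 hn
    rw [divsLoop, dif_neg (by rintro ⟨h2', h⟩; have hde : d ≤ e := le_trans (by nlinarith) h; omega)]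
    constructor
    · exact Or.inl
    · rintro (h | ⟨k, hdk, hkk, -, -⟩)
      · exact h
      · have : k ≤ e := by nlinarith
        omega
  | succ n ih =>
    intro d s x h2 hn
    by_cases hdd : d * d ≤ e
    · rw [divsLoop, dif_pos ⟨h2, hdd⟩]
      dsimp only
      have hde : d ≤ e := le_trans (by nlinarith) hdd
      have h2' : (2 : Int) ≤ d + 1 := by omega
      have hfuel : (e + 1 - (d + 1)).toNat ≤ n := by omega
      by_cases hdvd : d ∣ e
      · have hmod : PySem.Int.mod e d = 0 := (PySem.Int.mod_eq_zero_iff_dvd e d).mpr hdvd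
        rw [if_pos hmod,
          ih (d + 1) (PySem.Set.add (PySem.Set.add s d) (PySem.Int.floordiv e d)) x h2' hfuel]
        rw [PySem.Set.mem_add, PySem.Set.mem_add]
        constructor
        · rintro (((h | rfl) | rfl) | ⟨k, hdk, hkk, hkdvd, hx⟩)
          · exact Or.inl h
          · exact Or.inr ⟨x, le_refl x, hdd, hdvd, Or.inl rfl⟩
          · exact Or.inr ⟨d, le_refl d, hdd, hdvd, Or.inr rfl⟩
          · exact Or.inr ⟨k, by omega, hkk, hkdvd, hx⟩
        · rintro (h | ⟨k, hdk, hkk, hkdvd, hx⟩)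
          · exact Or.inl (Or.inl (Or.inl h))
          · by_cases hkd : k = d
            · subst hkd
              rcases hx with rfl | rfl
              · exact Or.inl (Or.inl (Or.inr rfl))
              · exact Or.inl (Or.inr rfl)
            · exact Or.inr ⟨k, by omega, hkk, hkdvd, hx⟩
      · have hmod : ¬ PySem.Int.mod e d = 0 :=
          fun h => hdvd ((PySem.Int.mod_eq_zero_iff_dvd e d).mp h)
        rw [if_neg hmod, ih (d + 1) s x h2' hfuel]
        constructor
        · rintro (h | ⟨k, hdk, hkk, hkdvd, hx⟩)
          · exact Or.inl h
          · exact Or.inr ⟨k, by omega, hkk, hkdvd, hx⟩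
        · rintro (h | ⟨k, hdk, hkk, hkdvd, hx⟩)
          · exact Or.inl h
          · by_cases hkd : k = d
            · subst hkd; exact absurd hkdvd hdvd
            · exact Or.inr ⟨k, by omega, hkk, hkdvd, hx⟩
    · rw [divsLoop, dif_neg (by rintro ⟨-, h⟩; exact hdd h)]
      constructor
      · exact Or.inl
      · rintro (h | ⟨k, hdk, hkk, -, -⟩)
        · exact h
        · exact absurd (by nlinarith : d * d ≤ e) hdd

lemma divsLoop_nodup (e : Int) :
    ∀ (n : Nat) (d : Int) (s : PySem.Set Int), (e + 1 - d).toNat ≤ n → s.Nodup →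
      (divsLoop e d s).Nodup := by
  intro n
  induction n with
  | zero =>
    intro d s hn hs
    by_cases h : 2 ≤ d ∧ d * d ≤ e
    · exfalso
      have : d ≤ e := le_trans (by nlinarith [h.1]) h.2
      omega
    · rw [divsLoop, dif_neg h]; exact hs
  | succ n ih =>
    intro d s hn hs
    by_cases h : 2 ≤ d ∧ d * d ≤ e
    · obtain ⟨h2, hdd⟩ := h
      have hde : d ≤ e := le_trans (by nlinarith) hdd
      rw [divsLoop, dif_pos ⟨h2, hdd⟩]
      dsimp only
      refine ih (d + 1) _ (by omega) ?_
      split_ifs with hm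
      · exact PySem.Set.nodup_add _ _ (PySem.Set.nodup_add _ _ hs)
      · exact hs
    · rw [divsLoop, dif_neg h]; exact hs

-- B's divisor set for e has exactly the membership Mfin e e
lemma divsB_mem (e x : Int) :
    x ∈ divsLoop e 2 (PySem.Set.ofList [1, e]) ↔ Mfin e e x := by
  rw [divsLoop_mem_aux e (e + 1 - 2).toNat 2 _ x le_rfl le_rfl, PySem.Set.mem_ofList]
  simp only [List.mem_cons, List.not_mem_nil, or_false]
  unfold Mfin
  constructor
  · rintro ((rfl | rfl) | ⟨k, hk2, hkk, hkdvd, hx⟩)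
    · exact Or.inl rfl
    · exact Or.inr (Or.inl rfl)
    · exact Or.inr (Or.inr ⟨k, hk2, hkk, hkdvd, le_trans (by nlinarith) hkk, hx⟩)
  · rintro (rfl | rfl | ⟨k, hk2, hkk, hkdvd, hke, hx⟩)
    · exact Or.inl (Or.inl rfl)
    · exact Or.inl (Or.inr rfl)
    · exact Or.inr ⟨k, hk2, hkk, hkdvd, hx⟩

-- equal membership between A's stored set and B's per-element set
lemma Mfin_shift (A_max e x : Int) (hle : e ≤ A_max) : Mfin A_max e x ↔ Mfin e e x := by
  by_cases he : 1 ≤ e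
  · rw [Mfin_pos A_max e x he hle, Mfin_pos e e x he le_rfl]
  · rw [Mfin_nonpos A_max e x (by omega), Mfin_nonpos e e x (by omega)]

-- ===== VERDICT (by name: the statement is the Claim_ definition above) =====
theorem solution_spec : Claim_equal_solution := by
  intro A _ hpre
  unfold Spec_solution solution solution_alt
  obtain ⟨A_max, hmax⟩ : ∃ m, PySem.List.max? A (fun x => x) = some m := by
    cases h : PySem.List.max? A (fun x => x) with
    | none => exact absurd ((PySem.List.max?_eq_none_iff A (fun x => x)).mp h) hpre
    | some m => exact ⟨m, rfl⟩
  rw [hmax]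
  dsimp only
  have hle : ∀ e ∈ A, e ≤ A_max := fun e he => PySem.List.max?_isMax hmax e he
  rw [countA_eq_countB]
  apply List.map_congr_left
  intro e he
  have hI0 : InvD 2 A (divisors0 A) := by
    intro e' he'
    refine ⟨PySem.Set.ofList [1, e'], ?_, PySem.Set.nodup_ofList _, fun x => ?_⟩
    · unfold divisors0
      rw [divisors0_aux, if_pos he']
    · rw [PySem.Set.mem_ofList]
      unfold Msie
      simp only [List.mem_cons, List.not_mem_nil, or_false]
      constructor
      · rintro (h | h)
        · exact Or.inl h
        · exact Or.inr (Or.inl h)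
      · rintro (h | h | ⟨k, hk2, hk, -⟩)
        · exact Or.inl h
        · exact Or.inr h
        · omega
  obtain ⟨s, hs, hnd, hmem⟩ := sieveOuter_inv A_max A hle (A_max + 1 - 2).toNat 2
    (divisors0 A) le_rfl le_rfl (by intro k hk2 hk; omega) hI0 e he
  have hgetD : (sieveOuter A_max 2 (divisors0 A)).getD e PySem.Set.empty = s := by
    rw [PySem.Dict.getD_eq_get?_getD, hs]
    rfl
  rw [hgetD]
  congr 1
  have hndB : (divsLoop e 2 (PySem.Set.ofList [1, e])).Nodup :=
    divsLoop_nodup e (e + 1 - 2).toNat 2 _ le_rfl (PySem.Set.nodup_ofList _)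
  have hperm : s.Perm (divsLoop e 2 (PySem.Set.ofList [1, e])) := by
    rw [List.perm_ext_iff_of_nodup hnd hndB]
    intro x
    rw [hmem x, divsB_mem e x, Mfin_shift A_max e x (hle e he)]
  exact List.Perm.sum_eq (hperm.map _)
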